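-- pv_equiv track=rewrite | github.com/raiedahmed/raiedseo | modules/analyzer.py | _calculate_page_score
-- ===== SOURCE A (Python) =====
-- def _calculate_page_score(result):
--     """حساب نتيجة سيو الصفحة بناءً على المشاكل المكتشفة"""
--     # نظام التقييم البسيط: 100 نقطة بداية، ثم خصم النقاط حسب المشاكل
--     score = 100
--
--     # تصنيف المشاكل حسب التأثير
--     high_impact = sum(1 for issue in result['issues'] if issue.get('impact') == 'high')
--     medium_impact = sum(1 for issue in result['issues'] if issue.get('impact') == 'medium')
--     low_impact = sum(1 for issue in result['issues'] if issue.get('impact') == 'low')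
--
--     # خصم النقاط بناءً على تأثير المشكلة
--     score -= high_impact * 10  # -10 نقاط لكل مشكلة عالية التأثير
--     score -= medium_impact * 5  # -5 نقاط لكل مشكلة متوسطة التأثير
--     score -= low_impact * 2  # -2 نقاط لكل مشكلة منخفضة التأثير
--
--     # التأكد من أن النتيجة بين 0 و 100
--     return max(0, min(100, score))
-- ===== SOURCE B (Python) =====
-- def _calculate_page_score(result):
--     """Single table-driven pass: one running total instead of three counting scans."""
--     weights = {'high': 10, 'medium': 5, 'low': 2}
--     total = sum(weights.get(issue.get('impact'), 0) for issue in result['issues'])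
--     return max(0, min(100, 100 - total))
-- ===== Notes on version B (the rewrite author's own statement) =====
-- stated objective: simpler
-- what changed: Replaces the three separate counting comprehensions and per-level deductions with one weight table and a single accumulating pass over the issues.
import Mathlib
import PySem

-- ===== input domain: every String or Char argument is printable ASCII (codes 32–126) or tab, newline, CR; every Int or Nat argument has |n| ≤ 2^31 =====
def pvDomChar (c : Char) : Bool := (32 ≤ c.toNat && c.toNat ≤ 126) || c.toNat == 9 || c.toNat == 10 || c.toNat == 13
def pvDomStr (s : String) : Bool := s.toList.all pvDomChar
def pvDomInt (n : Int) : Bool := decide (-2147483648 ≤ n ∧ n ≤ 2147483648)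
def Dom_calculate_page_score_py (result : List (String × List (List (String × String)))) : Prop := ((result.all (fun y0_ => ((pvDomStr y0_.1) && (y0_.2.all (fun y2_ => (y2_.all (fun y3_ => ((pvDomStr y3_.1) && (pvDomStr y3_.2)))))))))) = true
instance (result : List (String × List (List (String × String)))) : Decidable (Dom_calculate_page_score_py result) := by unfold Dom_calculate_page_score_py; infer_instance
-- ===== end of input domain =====

-- B replaces A's three counting scans with one weight-table-driven pass; equivalence proved on inputs having an 'issues' key.


-- shared primitive: Python dict.get on an association list (first match)
def pyGetKV (d : List (String × String)) (k : String) : Option String :=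
  (d.find? (fun p => p.1 == k)).map (·.2)

-- ===== PORT A =====
def calculate_page_score_py (result : List (String × List (List (String × String)))) : Int :=
  let issues := ((result.find? (fun p => p.1 == "issues")).map (·.2)).getD []
  -- score = 100
  let score : Int := 100
  -- three counting generator expressions
  let high_impact : Int := issues.foldl (fun acc issue => if pyGetKV issue "impact" == some "high" then acc + 1 else acc) 0
  let medium_impact : Int := issues.foldl (fun acc issue => if pyGetKV issue "impact" == some "medium" then acc + 1 else acc) 0
  let low_impact : Int := issues.foldl (fun acc issue => if pyGetKV issue "impact" == some "low" then acc + 1 else acc) 0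
  -- three deductions
  let score := score - high_impact * 10
  let score := score - medium_impact * 5
  let score := score - low_impact * 2
  max 0 (min 100 score)

-- ===== PORT B =====
def calculate_page_score_py_alt (result : List (String × List (List (String × String)))) : Int :=
  let weights : PySem.Dict String Int := PySem.Dict.ofList [("high", 10), ("medium", 5), ("low", 2)]
  let issues := ((result.find? (fun p => p.1 == "issues")).map (·.2)).getD []
  -- total = sum(weights.get(issue.get('impact'), 0) for issue in ...)
  let total : Int := issues.foldl (fun acc issue =>
      acc + (match pyGetKV issue "impact" with
             | some k => weights.getD k 0
             | none => 0)) 0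
  max 0 (min 100 (100 - total))

-- ===== PRECONDITION & SPEC =====
-- Pre_ excludes inputs without an 'issues' key, on which both Pythons raise KeyError.
def Pre_calculate_page_score_py (result : List (String × List (List (String × String)))) : Prop :=
  "issues" ∈ result.map (·.1)
instance (result : List (String × List (List (String × String)))) : Decidable (Pre_calculate_page_score_py result) := by unfold Pre_calculate_page_score_py; infer_instance

def pvWitness_calculate_page_score_py : (List (String × List (List (String × String)))) :=
  [("issues", [[("impact", "high")], [("impact", "nope")]])]

def Spec_calculate_page_score_py (result : List (String × List (List (String × String)))) (out : Int) : Prop := out = calculate_page_score_py_alt result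
instance (result : List (String × List (List (String × String)))) (out : Int) : Decidable (Spec_calculate_page_score_py result out) := by unfold Spec_calculate_page_score_py; infer_instance

-- ===== CLAIM (what is proved, stated in full; the proofs are below) =====
def Claim_equal_calculate_page_score_py : Prop := ∀ (result : List (String × List (List (String × String)))), Dom_calculate_page_score_py result → Pre_calculate_page_score_py result → Spec_calculate_page_score_py result (calculate_page_score_py result)

-- ===== LEMMAS AND PROOFS =====

-- the weight one issue contributes in B, written as A's three indicator terms
lemma pv_weight_eq (issue : List (String × String)) :
    (match pyGetKV issue "impact" with
     | some k => (PySem.Dict.ofList [("high", (10:Int)), ("medium", 5), ("low", 2)]).getD k 0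
     | none => 0)
    = (if pyGetKV issue "impact" == some "high" then (10:Int) else 0)
      + (if pyGetKV issue "impact" == some "medium" then 5 else 0)
      + (if pyGetKV issue "impact" == some "low" then 2 else 0) := by
  cases hg : pyGetKV issue "impact" with
  | none => simp
  | some k =>
    by_cases h1 : k = "high"
    · subst h1; decide
    by_cases h2 : k = "medium"
    · subst h2; decide
    by_cases h3 : k = "low"
    · subst h3; decide
    have hd : (PySem.Dict.ofList [("high", (10:Int)), ("medium", 5), ("low", 2)])
        = PySem.Dict.mk [("high", 10), ("medium", 5), ("low", 2)] := by decide
    simp [hd, PySem.Dict.getD_eq_get?_getD, PySem.Dict.get?,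
      Ne.symm h1, Ne.symm h2, Ne.symm h3, h1, h2, h3]

lemma pv_sum_eq (issues : List (List (String × String))) :
    (issues.map (fun issue =>
        (match pyGetKV issue "impact" with
         | some k => (PySem.Dict.ofList [("high", (10:Int)), ("medium", 5), ("low", 2)]).getD k 0
         | none => 0))).sum
    = 10 * (issues.countP (fun issue => pyGetKV issue "impact" == some "high") : Int)
      + 5 * (issues.countP (fun issue => pyGetKV issue "impact" == some "medium") : Int)
      + 2 * (issues.countP (fun issue => pyGetKV issue "impact" == some "low") : Int) := by
  induction issues with
  | nil => simp
  | cons x xs ih =>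
    simp only [List.map_cons, List.sum_cons, List.countP_cons, ih]
    rw [pv_weight_eq x]
    split_ifs <;> push_cast <;> omega

-- ===== VERDICT (by name: the statement is the Claim_ definition above) =====
theorem calculate_page_score_py_spec : Claim_equal_calculate_page_score_py := by
  intro result _ _
  unfold Spec_calculate_page_score_py
  show calculate_page_score_py result = calculate_page_score_py_alt result
  unfold calculate_page_score_py calculate_page_score_py_alt
  simp only [PySem.List.foldl_if_add_one, PySem.List.foldl_add, pv_sum_eq]
  omega
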